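-- pv_equiv track=rewrite | github.com/penguinwu/pt2-ontology | extractors/pytorch_source/config_docstrings.py | _leading_comment
-- ===== SOURCE A (Python) =====
-- def _leading_comment(lines: list[str], assign_lineno: int) -> str:
--     """Return the comment block immediately above `assign_lineno` (1-indexed).
--
--     Walk upward from the line above the assignment, collecting consecutive
--     `#`-prefixed lines (allowing leading whitespace). Stop at a non-comment
--     line or top of file. Return the comments joined with single newlines,
--     with the leading `# ` stripped per line. Returns "" if no comment block.
--     """
--     out: list[str] = []
--     i = assign_lineno - 2  # 0-indexed line above the assignment
--     while i >= 0:
--         line = lines[i].rstrip()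
--         stripped = line.lstrip()
--         if stripped.startswith("#"):
--             # strip "# " or "#" prefix; keep the rest verbatim
--             text = stripped[1:]
--             if text.startswith(" "):
--                 text = text[1:]
--             out.append(text)
--             i -= 1
--             continue
--         if stripped == "":
--             # blank line breaks the block
--             break
--         break
--     return "\n".join(reversed(out)).strip()
-- ===== SOURCE B (Python) =====
-- def _leading_comment(lines: list[str], assign_lineno: int) -> str:
--     """Return the comment block immediately above `assign_lineno` (1-indexed).
--
--     Two phases: first locate the top of the comment block by walking an index
--     upward while the line is a `#` comment (collecting nothing), then build the
--     result in one forward pass over the slice between that boundary and the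
--     assignment, stripping the `#`/`# ` prefix per line.
--     """
--     end = assign_lineno - 1  # 0-indexed, exclusive end of the candidate block
--     i = end - 1
--     while i >= 0 and lines[i].strip().startswith("#"):
--         i -= 1
--     parts = []
--     for line in lines[i + 1:end]:
--         s = line.strip()[1:]
--         parts.append(s[1:] if s.startswith(" ") else s)
--     return "\n".join(parts).strip()
-- ===== Notes on version B (the rewrite author's own statement) =====
-- stated objective: alternative
-- what changed: A collects comment texts while walking upward and reverses the accumulated list at the end; B first walks upward only to locate the top boundary of the comment block, then builds the result in one forward pass over the slice between the boundary and the assignment.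
import Mathlib
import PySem

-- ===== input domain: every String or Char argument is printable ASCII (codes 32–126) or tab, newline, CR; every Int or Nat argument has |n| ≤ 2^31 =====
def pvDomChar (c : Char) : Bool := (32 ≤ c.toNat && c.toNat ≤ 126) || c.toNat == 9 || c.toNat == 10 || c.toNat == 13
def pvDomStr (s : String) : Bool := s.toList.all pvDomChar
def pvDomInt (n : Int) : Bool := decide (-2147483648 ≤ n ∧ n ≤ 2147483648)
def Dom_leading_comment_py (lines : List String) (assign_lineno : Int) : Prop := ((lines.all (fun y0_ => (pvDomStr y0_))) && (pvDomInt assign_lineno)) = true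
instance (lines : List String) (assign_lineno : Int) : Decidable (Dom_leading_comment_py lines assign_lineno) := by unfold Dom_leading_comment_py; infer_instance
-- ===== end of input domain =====

-- B replaces A's reverse-accumulating upward collection by a boundary-locating upward scan
-- followed by one forward mapping pass over the slice (objective: alternative decomposition).

-- ===== PORT A =====
-- A's while loop, descending over the 0-indexed line number i; `out` is A's accumulator
-- (appended at the tail, reversed at the end, exactly as in the Python).
def pvText (stripped : String) : String :=
  let text := PySem.Str.slice stripped (some 1) none
  if PySem.Str.startswith text " " then PySem.Str.slice text (some 1) none else text

def pvStrippedA (lines : List String) (i : Nat) : String :=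
  PySem.Str.lstrip (PySem.Str.rstrip ((PySem.List.pyGet? lines (i : Int)).getD ""))

def pvGoA (lines : List String) : Nat → List String → List String
  | 0, out =>
    if PySem.Str.startswith (pvStrippedA lines 0) "#" then out ++ [pvText (pvStrippedA lines 0)] else out
  | Nat.succ j, out =>
    if PySem.Str.startswith (pvStrippedA lines (j + 1)) "#" then
      pvGoA lines j (out ++ [pvText (pvStrippedA lines (j + 1))])
    else out

def leading_comment_py (lines : List String) (assign_lineno : Int) : String :=
  let i := assign_lineno - 2
  let out := if i < 0 then ([] : List String) else pvGoA lines i.toNat []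
  PySem.Str.strip (PySem.Str.join "\n" out.reverse)

-- ===== PORT B =====
-- B's while-condition body: lines[i].strip().startswith("#")
def pvIsComment (lines : List String) (i : Nat) : Bool :=
  PySem.Str.startswith (PySem.Str.strip ((PySem.List.pyGet? lines (i : Int)).getD "")) "#"

-- B's boundary scan: move i upward while it points at a comment line; result is the
-- final value of i (may be -1).
def pvGoB (lines : List String) : Nat → Int
  | 0 => if pvIsComment lines 0 then -1 else 0
  | Nat.succ j => if pvIsComment lines (j + 1) then pvGoB lines j else ((j : Int) + 1)

-- B's per-line body: line.strip()[1:], then drop one leading space if present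
def pvPart (line : String) : String :=
  let s := PySem.Str.slice (PySem.Str.strip line) (some 1) none
  if PySem.Str.startswith s " " then PySem.Str.slice s (some 1) none else s

def leading_comment_py_alt (lines : List String) (assign_lineno : Int) : String :=
  let endIdx := assign_lineno - 1
  let i := if endIdx - 1 < 0 then endIdx - 1 else pvGoB lines (endIdx - 1).toNat
  let parts := (PySem.List.slice lines (some (i + 1)) (some endIdx)).map pvPart
  PySem.Str.strip (PySem.Str.join "\n" parts)

-- ===== PRECONDITION & SPEC =====
-- Pre_ excludes exactly the inputs where the Python A raises IndexError: the first
-- inspected index assign_lineno-2 is ≥ len(lines) (i.e. assign_lineno ≥ len(lines)+2).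
def Pre_leading_comment_py (lines : List String) (assign_lineno : Int) : Prop :=
  assign_lineno ≤ (lines.length : Int) + 1
instance (lines : List String) (assign_lineno : Int) : Decidable (Pre_leading_comment_py lines assign_lineno) := by unfold Pre_leading_comment_py; infer_instance

def pvWitness_leading_comment_py : List String × Int := (["# a comment", "x = 1"], 2)

def Spec_leading_comment_py (lines : List String) (assign_lineno : Int) (out : String) : Prop := out = leading_comment_py_alt lines assign_lineno
instance (lines : List String) (assign_lineno : Int) (out : String) : Decidable (Spec_leading_comment_py lines assign_lineno out) := by unfold Spec_leading_comment_py; infer_instance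

-- ===== CLAIM (what is proved, stated in full; the proofs are below) =====
def Claim_equal_leading_comment_py : Prop := ∀ (lines : List String) (assign_lineno : Int), Dom_leading_comment_py lines assign_lineno → Pre_leading_comment_py lines assign_lineno → Spec_leading_comment_py lines assign_lineno (leading_comment_py lines assign_lineno)

-- ===== LEMMAS AND PROOFS =====

-- dropWhile from the left and from the right commute (the two ends are independent)
lemma pv_dropWhile_rdropWhile_comm {α : Type} (p : α → Bool) (l : List α) :
    List.dropWhile p (List.rdropWhile p l) = List.rdropWhile p (List.dropWhile p l) := by
  induction l using List.reverseRecOn with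
  | nil => simp
  | append_singleton l x ih =>
    by_cases hx : p x
    · rw [List.rdropWhile_concat_pos p _ x hx, ih, List.dropWhile_append]
      split_ifs with h
      · simp only [List.isEmpty_iff] at h
        rw [h]
        simp [hx]
      · rw [List.rdropWhile_concat_pos p _ x hx]
    · rw [List.rdropWhile_concat_neg p _ x hx, List.dropWhile_append]
      split_ifs with h
      · simp [hx, List.rdropWhile_singleton]
      · rw [List.rdropWhile_concat_neg p _ x hx]

-- Python's s.rstrip().lstrip() equals s.strip()
lemma pv_lstrip_rstrip (s : String) : PySem.Str.lstrip (PySem.Str.rstrip s) = PySem.Str.strip s := by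
  simp only [PySem.Str.lstrip, PySem.Str.rstrip, PySem.Str.strip,
    PySem.Chars.lstrip, PySem.Chars.rstrip, PySem.Chars.strip]
  have h := pv_dropWhile_rdropWhile_comm PySem.Chars.isspace s.toList
  simp only [List.rdropWhile] at h
  simp [h]

-- A's per-line text equals B's pvPart, on a line taken from the list
lemma pv_text_eq (lines : List String) (i : Nat) (h : i < lines.length) :
    pvText (pvStrippedA lines i) = pvPart lines[i] := by
  simp [pvText, pvStrippedA, pvPart, pv_lstrip_rstrip, h]

-- A's comment test equals B's
lemma pv_test_eq (lines : List String) (i : Nat) :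
    PySem.Str.startswith (pvStrippedA lines i) "#" = pvIsComment lines i := by
  simp [pvIsComment, pvStrippedA, pv_lstrip_rstrip]

-- pvGoA's accumulator prepends
lemma pvGoA_acc (lines : List String) : ∀ (i : Nat) (out : List String),
    pvGoA lines i out = out ++ pvGoA lines i [] := by
  intro i
  induction i with
  | zero =>
    intro out
    simp only [pvGoA]
    split_ifs <;> simp
  | succ j ih =>
    intro out
    simp only [pvGoA]
    split_ifs with h
    · rw [ih (out ++ _), ih ([] ++ _)]
      simp
    · simp

-- bounds for B's scan result
lemma pvGoB_bounds (lines : List String) : ∀ i : Nat, -1 ≤ pvGoB lines i ∧ pvGoB lines i ≤ (i : Int) := by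
  intro i
  induction i with
  | zero => simp only [pvGoB]; split_ifs <;> simp
  | succ j ih =>
    simp only [pvGoB]
    split_ifs with h
    · push_cast; omega
    · push_cast; omega

-- extending a taken segment by one element on the right
lemma pv_take_extend {α : Type} (l : List α) (a m k : Nat) (hk : a + m = k) (h : k < l.length) :
    (l.drop a).take (m + 1) = (l.drop a).take m ++ [l[k]] := by
  subst hk
  rw [List.take_add_one]
  congr 1
  rw [List.getElem?_drop]
  simp [h]

-- the core invariant: A's collected list (reversed) is B's mapped segment
lemma pv_main (lines : List String) : ∀ i : Nat, i < lines.length →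
    (pvGoA lines i []).reverse
      = ((lines.drop (pvGoB lines i + 1).toNat).take (i + 1 - (pvGoB lines i + 1).toNat)).map pvPart := by
  intro i
  induction i with
  | zero =>
    intro hlen
    simp only [pvGoA, pvGoB, pv_test_eq]
    by_cases h : pvIsComment lines 0
    · rw [if_pos h, if_pos h]
      rw [pv_text_eq lines 0 hlen]
      obtain ⟨a, t, rfl⟩ := List.exists_cons_of_ne_nil (List.ne_nil_of_length_pos hlen)
      simp
    · rw [if_neg h, if_neg h]
      simp
  | succ j ih =>
    intro hlen
    have hj : j < lines.length := by omega
    simp only [pvGoA, pvGoB, pv_test_eq]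
    by_cases h : pvIsComment lines (j + 1)
    · rw [if_pos h, if_pos h]
      rw [pvGoA_acc, List.reverse_append, ih hj]
      have hb := pvGoB_bounds lines j
      have ha : (pvGoB lines j + 1).toNat ≤ j + 1 := by omega
      have h1 : j + 1 + 1 - (pvGoB lines j + 1).toNat = (j + 1 - (pvGoB lines j + 1).toNat) + 1 := by
        omega
      have h2 : (pvGoB lines j + 1).toNat + (j + 1 - (pvGoB lines j + 1).toNat) = j + 1 := by omega
      rw [h1, pv_take_extend lines _ _ (j + 1) h2 hlen]
      rw [List.map_append, pv_text_eq lines (j + 1) hlen]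
      simp
    · rw [if_neg h, if_neg h]
      have : ((j : Int) + 1 + 1).toNat = j + 2 := by omega
      rw [this]
      simp

-- an empty slice with equal bounds
lemma pv_slice_self {α : Type} (xs : List α) (a : Int) : PySem.List.slice xs (some a) (some a) = [] := by
  have h := PySem.List.length_slice xs a a
  exact List.eq_nil_of_length_eq_zero (by omega)

-- ===== VERDICT (by name: the statement is the Claim_ definition above) =====
theorem leading_comment_py_spec : Claim_equal_leading_comment_py := by
  intro lines assign_lineno _hdom hpre
  unfold Spec_leading_comment_py leading_comment_py leading_comment_py_alt
  simp only []
  by_cases hlt : assign_lineno - 2 < 0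
  · rw [if_pos hlt, if_pos (by omega)]
    rw [show assign_lineno - 1 - 1 + 1 = assign_lineno - 1 by ring]
    rw [pv_slice_self]
    simp
  · rw [if_neg hlt, if_neg (by omega)]
    rw [not_lt] at hlt
    have hn : (assign_lineno - 2).toNat < lines.length := by
      unfold Pre_leading_comment_py at hpre; omega
    have hidx : (assign_lineno - 1 - 1).toNat = (assign_lineno - 2).toNat := by omega
    rw [hidx]
    set n := (assign_lineno - 2).toNat with hnn
    have hb := pvGoB_bounds lines n
    set g := pvGoB lines n with hg
    have hmain := pv_main lines n hn
    rw [← hg] at hmain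
    have hend : assign_lineno - 1 = ((n : Int) + 1) := by omega
    rw [hend]
    have hslice : PySem.List.slice lines (some (g + 1)) (some ((n : Int) + 1))
        = (lines.drop (g + 1).toNat).take (n + 1 - (g + 1).toNat) := by
      rw [PySem.List.slice_toNat lines (show (0:Int) ≤ g + 1 by omega) (show (0:Int) ≤ (n : Int) + 1 by omega)]
      congr 1
    rw [hslice, ← hmain]
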